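-- pv_equiv track=rewrite | github.com/Sunteresa7/crypto_assignment | Part i/product_ui.py | preprocess_playfair_plaintext
-- ===== SOURCE A (Python) =====
-- def preprocess_playfair_plaintext(plaintext):
--     plaintext = plaintext.upper().replace('J', 'I')
--     plaintext = ''.join([c for c in plaintext if c.isalpha()])
--     processed = []
--     i = 0
--     n = len(plaintext)
--     while i < n:
--         if i == n - 1:
--             processed.append(plaintext[i] + 'X')
--             i += 1
--         else:
--             a = plaintext[i]
--             b = plaintext[i+1]
--             if a == b:
--                 processed.append(a + 'X')
--                 i += 1
--             else:
--                 processed.append(a + b)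
--                 i += 2
--     processed_text = ''.join(processed)
--     # if len(processed_text) % 2 != 0:  # No need. Handled inside the loop
--     #     processed_text += 'X'
--     return processed_text
-- ===== SOURCE B (Python) =====
-- def preprocess_playfair_plaintext(plaintext):
--     plaintext = plaintext.upper().replace('J', 'I')
--     filtered = ''.join([c for c in plaintext if c.isalpha()])
--     # stage 1: run-length encode the filtered text
--     runs = []
--     i = 0
--     n = len(filtered)
--     while i < n:
--         c = filtered[i]
--         j = i + 1
--         while j < n and filtered[j] == c:
--             j += 1
--         runs.append((c, j - i))
--         i = j
--     # stage 2: emit whole runs at once by arithmetic on run lengths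
--     out = []
--     i = 0
--     while i < len(runs):
--         c, k = runs[i]
--         if k == 0:
--             i += 1
--             continue
--         if i == len(runs) - 1:
--             out.append((c + 'X') * k)
--         else:
--             d, m = runs[i + 1]
--             out.append((c + 'X') * (k - 1) + c + d)
--             runs[i + 1] = (d, m - 1)
--         i += 1
--     return ''.join(out)
-- ===== Notes on version B (the rewrite author's own statement) =====
-- stated objective: alternative
-- what changed: Replaces A's per-character lookahead loop (index i stepping by 1 or 2) with two staged passes: a run-length encoding of the filtered text, then a loop over the runs that emits each run's digraphs in bulk by arithmetic on run lengths ((c+'X')*(k-1) plus the bridging pair into the next run).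
import Mathlib
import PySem

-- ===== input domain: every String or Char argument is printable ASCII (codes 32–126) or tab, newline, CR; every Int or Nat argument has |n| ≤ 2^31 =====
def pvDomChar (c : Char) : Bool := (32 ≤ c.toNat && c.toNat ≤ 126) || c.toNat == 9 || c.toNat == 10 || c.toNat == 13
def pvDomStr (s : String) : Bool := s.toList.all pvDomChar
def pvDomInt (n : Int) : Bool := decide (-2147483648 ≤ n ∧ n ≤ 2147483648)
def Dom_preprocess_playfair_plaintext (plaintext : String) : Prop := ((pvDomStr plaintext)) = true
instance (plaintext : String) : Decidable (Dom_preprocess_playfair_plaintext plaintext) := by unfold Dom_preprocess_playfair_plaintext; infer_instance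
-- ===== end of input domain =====

-- B replaces A's per-character lookahead loop by two staged passes: a run-length encoding
-- of the filtered text, then per-run bulk emission by arithmetic on run lengths
-- ((c+'X')*(k-1) at once); objective: alternative. Return-value equivalence only.

-- ===== PORT A =====
-- A's while loop over the filtered characters: i == n-1 (single char left), a == b (step 1), else (step 2).
def pvLoopA : List Char → List (List Char)
  | [] => []
  | [a] => [[a, 'X']]
  | a :: b :: rest =>
    if a == b then [a, 'X'] :: pvLoopA (b :: rest)   -- a == b: i += 1
    else [a, b] :: pvLoopA rest                      -- else:   i += 2

def preprocess_playfair_plaintext (plaintext : String) : String :=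
  let p1 := PySem.Str.replace (PySem.Str.upper plaintext) "J" "I"
  -- ''.join([c for c in p1 if c.isalpha()]) : a join of single characters is the filtered character list (exact)
  let p2 := p1.toList.filter (fun c => PySem.Chars.isalpha c)
  String.ofList (PySem.Chars.join [] (pvLoopA p2))

-- ===== PORT B =====
-- Source B's inner `while j < n and filtered[j] == c: j += 1` counting loop
def pvCountEq (c : Char) : List Char → Nat
  | [] => 0
  | d :: r => if d == c then pvCountEq c r + 1 else 0

-- Source B's first while loop: run-length encoding
def pvRuns : List Char → List (Char × Nat)
  | [] => []
  | c :: rest => (c, 1 + pvCountEq c rest) :: pvRuns (rest.drop (pvCountEq c rest))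
  termination_by xs => xs.length
  decreasing_by simp [List.length_drop]

-- Source B's second while loop over the runs list (advancing i + updating runs[i+1] in place
-- = recursion on the tail with a modified head)
def pvEmit : List (Char × Nat) → List (List Char)
  | [] => []
  | (c, k) :: rest =>
    if k = 0 then pvEmit rest
    else
      match rest with
      | [] => [PySem.List.pyRepeat [c, 'X'] (k : Int)]                       -- last run: (c+'X')*k
      | (d, m) :: rest2 =>
        (PySem.List.pyRepeat [c, 'X'] ((k : Int) - 1) ++ [c, d]) :: pvEmit ((d, m - 1) :: rest2)
  termination_by rs => rs.length
  decreasing_by all_goals simp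

def preprocess_playfair_plaintext_alt (plaintext : String) : String :=
  let p1 := PySem.Str.replace (PySem.Str.upper plaintext) "J" "I"
  let p2 := p1.toList.filter (fun c => PySem.Chars.isalpha c)
  String.ofList (PySem.Chars.join [] (pvEmit (pvRuns p2)))

-- ===== PRECONDITION & SPEC =====
def Spec_preprocess_playfair_plaintext (plaintext : String) (out : String) : Prop := out = preprocess_playfair_plaintext_alt plaintext
instance (plaintext : String) (out : String) : Decidable (Spec_preprocess_playfair_plaintext plaintext out) := by unfold Spec_preprocess_playfair_plaintext; infer_instance

-- ===== CLAIM =====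
def Claim_equal_preprocess_playfair_plaintext : Prop := ∀ (plaintext : String), Dom_preprocess_playfair_plaintext plaintext → Spec_preprocess_playfair_plaintext plaintext (preprocess_playfair_plaintext plaintext)

-- ===== LEMMAS AND PROOFS =====
theorem pv_join_nil_flatten (l : List (List Char)) : PySem.Chars.join [] l = l.flatten := by
  induction l with
  | nil => rfl
  | cons x t ih => simp [PySem.Chars.join, List.intercalate] at *; cases t <;> simp_all

theorem pvCountEq_take (c : Char) (rest : List Char) :
    rest.take (pvCountEq c rest) = List.replicate (pvCountEq c rest) c := by
  induction rest with
  | nil => rfl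
  | cons d r ih =>
    by_cases h : d = c
    · subst h; simp [pvCountEq, List.replicate_succ, ih]
    · simp [pvCountEq, h]

theorem pvCountEq_drop_head (c : Char) (rest : List Char) :
    (rest.drop (pvCountEq c rest)).head? ≠ some c := by
  induction rest with
  | nil => simp
  | cons d r ih =>
    by_cases h : d = c
    · subst h; simpa [pvCountEq] using ih
    · simp [pvCountEq, h]

theorem pvCountEq_pos (d : Char) (rest : List Char) (h : 1 ≤ pvCountEq d rest) :
    ∃ r3, rest = d :: r3 ∧ pvCountEq d r3 = pvCountEq d rest - 1 := by
  cases rest with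
  | nil => simp [pvCountEq] at h
  | cons x r =>
    by_cases hx : x = d
    · subst hx; exact ⟨r, rfl, by simp [pvCountEq]⟩
    · simp [pvCountEq, hx] at h

theorem pvLoopA_replicate (c : Char) (k : Nat) (hk : 1 ≤ k) :
    pvLoopA (List.replicate k c) = List.replicate k [c, 'X'] := by
  induction k, hk using Nat.le_induction with
  | base => rfl
  | succ n hn ih =>
    obtain ⟨m, rfl⟩ : ∃ m, n = m + 1 := ⟨n - 1, by omega⟩
    have e : List.replicate (m + 1 + 1) c = c :: c :: List.replicate m c := by
      simp [List.replicate_succ]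
    rw [e]
    simp only [pvLoopA, beq_self_eq_true, if_true]
    rw [← List.replicate_succ, ih]
    simp [List.replicate_succ]

theorem pvLoopA_run_cons (c d : Char) (k : Nat) (rest'' : List Char) (hk : 1 ≤ k) (hd : d ≠ c) :
    pvLoopA (List.replicate k c ++ d :: rest'') =
      List.replicate (k - 1) [c, 'X'] ++ [c, d] :: pvLoopA rest'' := by
  induction k, hk using Nat.le_induction with
  | base =>
    have hdc : (c == d) = false := by simp; exact fun e => hd e.symm
    simp [pvLoopA, hdc]
  | succ n hn ih =>
    obtain ⟨m, rfl⟩ : ∃ m, n = m + 1 := ⟨n - 1, by omega⟩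
    have e : List.replicate (m + 1 + 1) c ++ d :: rest'' = c :: c :: (List.replicate m c ++ d :: rest'') := by
      simp [List.replicate_succ]
    rw [e]
    simp only [pvLoopA, beq_self_eq_true, if_true]
    rw [show c :: (List.replicate m c ++ d :: rest'') = List.replicate (m + 1) c ++ d :: rest'' from by
      simp [List.replicate_succ], ih]
    simp [List.replicate_succ]

theorem pvMainAux : ∀ n (xs : List Char), xs.length ≤ n →
    (pvEmit (pvRuns xs)).flatten = (pvLoopA xs).flatten := by
  intro n
  induction n with
  | zero => intro xs h; rw [List.length_eq_zero_iff.mp (Nat.le_zero.mp h)]; simp [pvRuns, pvEmit, pvLoopA]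
  | succ n ih =>
    intro xs hlen
    cases xs with
    | nil => simp [pvRuns, pvEmit, pvLoopA]
    | cons c rest =>
      have hrest : rest.length ≤ n := by simpa using hlen
      set t := pvCountEq c rest with ht
      have hxs : c :: rest = List.replicate (t + 1) c ++ rest.drop t := by
        conv_lhs => rw [← List.take_append_drop t rest]
        rw [pvCountEq_take, List.replicate_succ]
        rfl
      have hruns : pvRuns (c :: rest) = (c, 1 + t) :: pvRuns (rest.drop t) := by
        simp only [pvRuns]
        rfl
      cases hdrop : rest.drop t with
      | nil =>
        rw [hruns, hdrop]
        have h1 : pvRuns ([] : List Char) = [] := by simp [pvRuns]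
        rw [h1]
        have h2 : pvEmit [(c, 1 + t)] = [PySem.List.pyRepeat [c, 'X'] ((1 + t : Nat) : Int)] := by
          simp [pvEmit]
        rw [h2]
        conv_rhs => rw [hxs, hdrop, List.append_nil, pvLoopA_replicate c (t + 1) (by omega)]
        simp [PySem.List.pyRepeat, Nat.add_comm]
      | cons d rest'' =>
        have hd : d ≠ c := by
          have := pvCountEq_drop_head c rest
          rw [hdrop] at this; simpa using this
        have hlen'' : rest''.length ≤ n := by
          have h := congrArg List.length hdrop
          simp at h
          omega
        rw [hruns, hdrop]
        rw [show pvRuns (d :: rest'') = (d, 1 + pvCountEq d rest'') :: pvRuns (rest''.drop (pvCountEq d rest'')) from by simp only [pvRuns]]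
        set t2 := pvCountEq d rest'' with ht2
        have hemit : pvEmit ((c, 1 + t) :: (d, 1 + t2) :: pvRuns (rest''.drop t2)) =
            (PySem.List.pyRepeat [c, 'X'] (((1 + t : Nat) : Int) - 1) ++ [c, d]) ::
              pvEmit ((d, (1 + t2) - 1) :: pvRuns (rest''.drop t2)) := by
          simp [pvEmit]
        rw [hemit]
        have htail : pvEmit ((d, (1 + t2) - 1) :: pvRuns (rest''.drop t2)) = pvEmit (pvRuns rest'') := by
          by_cases h0 : t2 = 0
          · rw [h0]
            conv_lhs => rw [pvEmit.eq_def]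
            simp
          · have hpos : 1 ≤ pvCountEq d rest'' := by
              rw [ht2] at h0; exact Nat.one_le_iff_ne_zero.mpr h0
            obtain ⟨r3, hr3, hc3⟩ := pvCountEq_pos d rest'' hpos
            have : pvRuns rest'' = (d, 1 + (t2 - 1)) :: pvRuns (r3.drop (t2 - 1)) := by
              rw [hr3, ← hc3]; simp only [pvRuns]
            rw [this]
            obtain ⟨u, hu⟩ : ∃ u, t2 = u + 1 := ⟨t2 - 1, by rw [ht2]; omega⟩
            rw [hr3, hu]
            simp [Nat.add_comm]
        rw [htail]
        conv_rhs => rw [hxs, hdrop, pvLoopA_run_cons c d (t + 1) rest'' (by omega) hd]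
        simp only [List.flatten_cons, List.flatten_append]
        rw [ih rest'' hlen'']
        have hrep : PySem.List.pyRepeat [c, 'X'] (((1 + t : Nat) : Int) - 1) =
            (List.replicate (t + 1 - 1) [c, 'X']).flatten := by
          simp [PySem.List.pyRepeat]
        rw [hrep]
        simp

-- ===== VERDICT =====
theorem preprocess_playfair_plaintext_spec : Claim_equal_preprocess_playfair_plaintext := by
  intro plaintext _
  unfold Spec_preprocess_playfair_plaintext preprocess_playfair_plaintext preprocess_playfair_plaintext_alt
  simp only [pv_join_nil_flatten]
  rw [pvMainAux (PySem.Str.replace (PySem.Str.upper plaintext) "J" "I").toList.length]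
  simp [List.length_filter_le]
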